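-- pv_equiv track=rewrite | github.com/DiscoveryPiscine42Bangkok2025/discovery-piscine-coding-with-python-TIMEMIXCELL | rush_prj/checkmate.py | check_lines_straight
-- ===== SOURCE A (Python) =====
-- def in_bounds(r, c, n):
--     return 0 <= r < n and 0 <= c < n #เช็ค input
--
-- def check_lines_straight(board, kr, kc):
--     n = len(board)
--     # ทิศ: ขึ้น, ลง, ซ้าย, ขวา
--     directions = [(-1, 0), (1, 0), (0, -1), (0, 1)]
--
--     for dr, dc in directions:
--         r = kr + dr
--         c = kc + dc
--         while in_bounds(r, c, n):
--             cell = board[r][c]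
--             if cell != '.':
--                 # เจอชิ้นแรกในเส้นนี้
--                 if cell == 'R' or cell == 'Q':
--                     return True
--                 else:
--                     # เป็นชิ้นอื่น บังทาง หยุดทิศนี้
--                     break
--             r += dr
--             c += dc
--
--     return False
-- ===== SOURCE B (Python) =====
-- def first_piece(cells):
--     return next((c for c in cells if c != '.'), '.')
--
-- def check_lines_straight(board, kr, kc):
--     n = len(board)
--     if not (0 <= kr < n and 0 <= kc < n):
--         return False
--     row = board[kr]
--     col = [board[i][kc] for i in range(n)]
--     rays = [col[:kr][::-1], col[kr + 1:], row[:kc][::-1], row[kc + 1:]]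
--     return any(first_piece(ray) in ('R', 'Q') for ray in rays)
-- ===== Notes on version B (the rewrite author's own statement) =====
-- stated objective: simpler
-- what changed: A walks each of the four directions with a coordinate-stepping while-loop over (r,c); B slices the king's row and column into four outward ray lists and tests whether the first non-'.' cell of each ray is 'R' or 'Q', after a guard that an off-board king is never attacked.
-- outside the precondition, e.g. on check_lines_straight(['R'], 1, 0): A returns True, B returns False; on check_lines_straight(['..R', '.R.'], 0, 0): A returns False, B returns True
import Mathlib
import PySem

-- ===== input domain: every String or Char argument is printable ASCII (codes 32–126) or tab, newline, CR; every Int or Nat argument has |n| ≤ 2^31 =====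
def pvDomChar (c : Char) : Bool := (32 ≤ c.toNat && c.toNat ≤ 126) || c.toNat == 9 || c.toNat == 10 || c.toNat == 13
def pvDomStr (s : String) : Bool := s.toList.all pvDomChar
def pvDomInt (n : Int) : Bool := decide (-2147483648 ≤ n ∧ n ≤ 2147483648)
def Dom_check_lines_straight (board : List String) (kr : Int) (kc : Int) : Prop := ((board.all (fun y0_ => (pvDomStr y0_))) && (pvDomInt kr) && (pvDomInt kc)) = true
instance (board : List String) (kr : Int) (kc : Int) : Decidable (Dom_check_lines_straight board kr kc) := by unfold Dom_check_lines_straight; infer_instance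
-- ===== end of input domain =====

-- B replaces A's four coordinate-stepping while-loops by slicing the king's row and
-- column into four outward rays and testing the first non-'.' cell of each (objective: simpler).

-- ===== PORT A =====
def pyInBounds (r c n : Int) : Bool := decide (0 ≤ r ∧ r < n) && decide (0 ≤ c ∧ c < n)

-- the while-loop of A for one direction (fuel bounds the iteration count; enough fuel is passed)
def scanDir (board : List String) (n dr dc : Int) : Nat → Int → Int → Bool
  | 0, _, _ => false
  | fuel + 1, r, c =>
    if pyInBounds r c n then
      match PySem.List.pyGet? board r with
      | none => false          -- board[r] IndexError: outside Pre_
      | some rowS =>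
        match PySem.Str.pyGet? rowS c with
        | none => false        -- board[r][c] IndexError: outside Pre_
        | some cell =>
          if cell ≠ '.' then
            (if cell = 'R' ∨ cell = 'Q' then true else false)
          else scanDir board n dr dc fuel (r + dr) (c + dc)
    else false

def check_lines_straight (board : List String) (kr : Int) (kc : Int) : Bool :=
  let n : Int := board.length
  [((-1 : Int), (0 : Int)), (1, 0), (0, -1), (0, 1)].any fun d =>
    scanDir board n d.1 d.2 n.toNat (kr + d.1) (kc + d.2)

-- ===== PORT B =====
def firstPiece : List Char → Char
  | [] => '.'
  | c :: rest => if c ≠ '.' then c else firstPiece rest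

def check_lines_straight_alt (board : List String) (kr : Int) (kc : Int) : Bool :=
  let n : Int := board.length
  if 0 ≤ kr ∧ kr < n ∧ 0 ≤ kc ∧ kc < n then
    let row : List Char := ((PySem.List.pyGet? board kr).getD "").toList
    let col : List Char := (PySem.List.pyRange 0 n 1).map fun i =>
      (PySem.Str.pyGet? ((PySem.List.pyGet? board i).getD "") kc).getD '.'
    let rays : List (List Char) :=
      [ (PySem.List.slice col none (some kr)).reverse
      , PySem.List.slice col (some (kr + 1)) none
      , (PySem.List.slice row none (some kc)).reverse
      , PySem.List.slice row (some (kc + 1)) none ]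
    rays.any fun ray => firstPiece ray = 'R' || firstPiece ray = 'Q'
  else false

-- ===== PRECONDITION & SPEC =====
-- Pre_ admits (a) the natural domain — king on the board and a square board (rows of
-- length n = len(board)), and (b) every input whose king square is so far off the board
-- that A's four scans start out of bounds and touch no cell. Excluded (see claim.json
-- cites): ragged boards with the king on or next to the board, where A may raise
-- IndexError or its value depends on which cells the scan happens to visit, and king
-- squares immediately outside the board edge — an unspecified corner, where A scans a
-- line from the clipped adjacent square while B says an off-board king is never attacked.
def Pre_check_lines_straight (board : List String) (kr : Int) (kc : Int) : Prop :=
  (0 ≤ kr ∧ kr < (board.length : Int) ∧ 0 ≤ kc ∧ kc < (board.length : Int) ∧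
    ∀ s ∈ board, s.toList.length = board.length) ∨
  ¬ ((0 ≤ kc ∧ kc < (board.length : Int) ∧ -1 ≤ kr ∧ kr ≤ (board.length : Int)) ∨
     (0 ≤ kr ∧ kr < (board.length : Int) ∧ -1 ≤ kc ∧ kc ≤ (board.length : Int)))
instance (board : List String) (kr : Int) (kc : Int) : Decidable (Pre_check_lines_straight board kr kc) := by
  unfold Pre_check_lines_straight; infer_instance

def pvWitness_check_lines_straight : List String × Int × Int := (["R..", "...", "..K"], 2, 2)

def Spec_check_lines_straight (board : List String) (kr : Int) (kc : Int) (out : Bool) : Prop := out = check_lines_straight_alt board kr kc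
instance (board : List String) (kr : Int) (kc : Int) (out : Bool) : Decidable (Spec_check_lines_straight board kr kc out) := by unfold Spec_check_lines_straight; infer_instance

-- ===== CLAIM (what is proved, stated in full; the proofs are below) =====
def Claim_equal_check_lines_straight : Prop := ∀ (board : List String) (kr : Int) (kc : Int), Dom_check_lines_straight board kr kc → Pre_check_lines_straight board kr kc → Spec_check_lines_straight board kr kc (check_lines_straight board kr kc)

-- ===== LEMMAS AND PROOFS =====

-- proof-side abstraction: A's while-loop along one list of cells
def lineScan (L : List Char) : Nat → Int → Int → Bool
  | 0, _, _ => false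
  | fuel + 1, p, step =>
    if 0 ≤ p ∧ p < (L.length : Int) then
      let cell := L.getD p.toNat '.'
      if cell ≠ '.' then (cell = 'R' || cell = 'Q') else lineScan L fuel (p + step) step
    else false

-- proof-side abbreviation of B's per-ray test
def rayHit (cells : List Char) : Bool := firstPiece cells = 'R' || firstPiece cells = 'Q'

-- a scan whose start square is off the board touches nothing
lemma scanDir_off (board : List String) (n dr dc : Int) (fuel : Nat) (r c : Int)
    (h : ¬ (0 ≤ r ∧ r < n ∧ 0 ≤ c ∧ c < n)) :
    scanDir board n dr dc fuel r c = false := by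
  cases fuel with
  | zero => rfl
  | succ f => rw [scanDir, if_neg (by simp [pyInBounds]; omega)]

-- A's horizontal scan along the king's row is lineScan on that row
lemma scanDir_row (board : List String) (s : String) (kr : Int)
    (h0 : 0 ≤ kr) (h1 : kr < (board.length : Int))
    (hrow : PySem.List.pyGet? board kr = some s)
    (hlen : s.toList.length = board.length) (dc : Int) :
    ∀ (fuel : Nat) (c : Int),
      scanDir board (board.length : Int) 0 dc fuel kr c = lineScan s.toList fuel c dc := by
  intro fuel
  induction fuel with
  | zero => intro c; simp [scanDir, lineScan]
  | succ f ih =>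
    intro c
    rw [scanDir, lineScan]
    have hlb : ((s.toList.length : Int)) = ((board.length : Int)) := by exact_mod_cast hlen
    rw [hlb]
    by_cases hc : 0 ≤ c ∧ c < (board.length : Int)
    · rw [if_pos (by simp [pyInBounds, h0, h1, hc.1, hc.2]), if_pos hc, hrow]
      have hcn : c.toNat < s.toList.length := by omega
      have hget : PySem.Str.pyGet? s c = some s.toList[c.toNat] := by
        simp [PySem.Str.pyGet?, PySem.List.pyGet?_of_nonneg _ hc.1, List.getElem?_eq_getElem hcn]
      simp only [hget, List.getD_eq_getElem?_getD, List.getElem?_eq_getElem hcn, Option.getD_some]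
      by_cases hdot : s.toList[c.toNat] = '.'
      · simp only [hdot, ne_eq, not_true_eq_false, if_false, add_zero]
        exact ih (c + dc)
      · simp only [ne_eq, hdot, not_false_eq_true, if_true]
        by_cases hrq : s.toList[c.toNat] = 'R' ∨ s.toList[c.toNat] = 'Q'
        · rw [if_pos hrq]; rcases hrq with h | h <;> simp [h]
        · rw [if_neg hrq]; rw [not_or] at hrq; simp [hrq.1, hrq.2]
    · rw [if_neg (by simp [pyInBounds]; omega), if_neg hc]

lemma scanDir_col (board : List String) (kc : Int)
    (h0 : 0 ≤ kc) (h1 : kc < (board.length : Int))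
    (hlen : ∀ s ∈ board, s.toList.length = board.length) (dr : Int) :
    ∀ (fuel : Nat) (r : Int),
      scanDir board (board.length : Int) dr 0 fuel r kc =
      lineScan ((PySem.List.pyRange 0 (board.length : Int) 1).map fun i =>
        (PySem.Str.pyGet? ((PySem.List.pyGet? board i).getD "") kc).getD '.') fuel r dr := by
  intro fuel
  induction fuel with
  | zero => intro r; simp [scanDir, lineScan]
  | succ f ih =>
    intro r
    rw [scanDir, lineScan]
    have hlenL : ((PySem.List.pyRange 0 (board.length : Int) 1).map fun i =>
        (PySem.Str.pyGet? ((PySem.List.pyGet? board i).getD "") kc).getD '.').length = board.length := by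
      simp [PySem.List.length_pyRange_one]
    rw [hlenL]
    by_cases hc : 0 ≤ r ∧ r < (board.length : Int)
    · rw [if_pos (by simp [pyInBounds, h0, h1, hc.1, hc.2]), if_pos hc]
      have hrn : r.toNat < board.length := by omega
      have hrow : PySem.List.pyGet? board r = some board[r.toNat] := by
        rw [PySem.List.pyGet?_of_nonneg _ hc.1, List.getElem?_eq_getElem hrn]
      have hkclen : kc.toNat < (board[r.toNat]).toList.length := by
        rw [hlen _ (List.getElem_mem hrn)]; omega
      have hget : PySem.Str.pyGet? board[r.toNat] kc = some (board[r.toNat]).toList[kc.toNat] := by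
        simp [PySem.Str.pyGet?, PySem.List.pyGet?_of_nonneg _ h0, List.getElem?_eq_getElem hkclen]
      have hb : r.toNat < ((PySem.List.pyRange 0 (board.length : Int) 1).map fun i =>
          (PySem.Str.pyGet? ((PySem.List.pyGet? board i).getD "") kc).getD '.').length := by
        rw [hlenL]; exact hrn
      have hcell : ((PySem.List.pyRange 0 (board.length : Int) 1).map fun i =>
          (PySem.Str.pyGet? ((PySem.List.pyGet? board i).getD "") kc).getD '.').getD r.toNat '.' =
          (board[r.toNat]).toList[kc.toNat] := by
        rw [List.getD_eq_getElem?_getD, List.getElem?_eq_getElem hb, Option.getD_some,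
          List.getElem_map, PySem.List.getElem_pyRange_one,
          show (0 + ((r.toNat : Int))) = r by omega, hrow]
        simp [PySem.List.pyGet?_of_nonneg _ h0, List.getElem?_eq_getElem hkclen]
      simp only [hrow, hget, hcell]
      by_cases hdot : (board[r.toNat]).toList[kc.toNat] = '.'
      · simp only [hdot, ne_eq, not_true_eq_false, if_false, add_zero]
        exact ih (r + dr)
      · simp only [ne_eq, hdot, not_false_eq_true, if_true]
        by_cases hrq : (board[r.toNat]).toList[kc.toNat] = 'R' ∨ (board[r.toNat]).toList[kc.toNat] = 'Q'
        · rw [if_pos hrq]; rcases hrq with h | h <;> simp [h]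
        · rw [if_neg hrq]; rw [not_or] at hrq; simp [hrq.1, hrq.2]
    · rw [if_neg (by simp [pyInBounds]; omega), if_neg hc]

lemma lineScan_forward (L : List Char) :
    ∀ (fuel : Nat) (p : Int), 0 ≤ p → L.length ≤ p.toNat + fuel →
      lineScan L fuel p 1 = rayHit (L.drop p.toNat) := by
  intro fuel
  induction fuel with
  | zero =>
    intro p h0 hle
    rw [List.drop_eq_nil_of_le (by omega)]
    simp [lineScan, rayHit, firstPiece]
  | succ f ih =>
    intro p h0 hle
    by_cases h : p < (L.length : Int)
    · have hlt : p.toNat < L.length := by omega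
      rw [List.drop_eq_getElem_cons hlt]
      rw [lineScan]
      rw [if_pos ⟨h0, h⟩]
      simp only [List.getD_eq_getElem?_getD, List.getElem?_eq_getElem hlt, Option.getD_some]
      by_cases hc : L[p.toNat] = '.'
      · rw [if_neg (by simpa using hc)]
        rw [ih (p + 1) (by omega) (by omega)]
        have : (p + 1).toNat = p.toNat + 1 := by omega
        rw [this]
        simp [rayHit, firstPiece, hc]
      · rw [if_pos hc]
        simp [rayHit, firstPiece, hc]
    · rw [lineScan, if_neg (by omega)]
      rw [List.drop_eq_nil_of_le (by omega)]
      simp [rayHit, firstPiece]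

lemma lineScan_backward (L : List Char) :
    ∀ (k : Nat) (fuel : Nat), k ≤ L.length → k ≤ fuel →
      lineScan L fuel ((k : Int) - 1) (-1) = rayHit ((L.take k).reverse) := by
  intro k
  induction k with
  | zero =>
    intro fuel _ _
    cases fuel with
    | zero => simp [lineScan, rayHit, firstPiece]
    | succ f => rw [lineScan, if_neg (by omega)]; simp [rayHit, firstPiece]
  | succ k ih =>
    intro fuel hlen hfuel
    cases fuel with
    | zero => omega
    | succ f =>
      have hlt : k < L.length := by omega
      rw [show (((k + 1 : Nat)) : Int) - 1 = (k : Int) by push_cast; ring]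
      rw [lineScan]
      rw [if_pos (by constructor <;> [omega; exact_mod_cast hlt])]
      rw [List.take_add_one, List.getElem?_eq_getElem hlt]
      simp only [Int.toNat_natCast, List.getD_eq_getElem?_getD, List.getElem?_eq_getElem hlt,
        Option.getD_some, Option.toList_some, List.reverse_append, List.reverse_cons,
        List.reverse_nil, List.nil_append, List.cons_append]
      by_cases hc : L[k] = '.'
      · rw [if_neg (by simpa using hc)]
        rw [show (k : Int) + -1 = (k : Int) - 1 by ring]
        rw [ih f (by omega) (by omega)]
        simp [rayHit, firstPiece, hc]
      · rw [if_pos (by simpa using hc)]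
        simp [rayHit, firstPiece, hc]

-- ===== VERDICT (by name: the statement is the Claim_ definition above) =====
theorem check_lines_straight_spec : Claim_equal_check_lines_straight := by
  intro board kr kc _hdom hpre
  unfold Spec_check_lines_straight
  rcases hpre with ⟨h0r, h1r, h0c, h1c, hlen⟩ | hfar
  · have hkrn : kr.toNat < board.length := by omega
    have hrow : PySem.List.pyGet? board kr = some board[kr.toNat] := by
      rw [PySem.List.pyGet?_of_nonneg _ h0r, List.getElem?_eq_getElem hkrn]
    have hslen : board[kr.toNat].toList.length = board.length :=
      hlen _ (List.getElem_mem hkrn)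
    simp only [check_lines_straight, check_lines_straight_alt, List.any_cons, List.any_nil,
      Bool.or_false, hrow, Option.getD_some]
    rw [if_pos ⟨h0r, h1r, h0c, h1c⟩]
    rw [show kr + 0 = kr from by ring, show kc + 0 = kc from by ring]
    rw [scanDir_row board board[kr.toNat] kr h0r h1r hrow hslen (-1),
        scanDir_row board board[kr.toNat] kr h0r h1r hrow hslen 1,
        scanDir_col board kc h0c h1c hlen (-1),
        scanDir_col board kc h0c h1c hlen 1]
    rw [PySem.List.slice_to _ h0c, PySem.List.slice_from _ (by omega : (0:Int) ≤ kc + 1),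
        PySem.List.slice_to _ h0r, PySem.List.slice_from _ (by omega : (0:Int) ≤ kr + 1)]
    have hcollen : ((PySem.List.pyRange 0 (board.length : Int) 1).map fun i =>
        (PySem.Str.pyGet? ((PySem.List.pyGet? board i).getD "") kc).getD '.').length
        = board.length := by
      simp [PySem.List.length_pyRange_one]
    rw [show kr + -1 = ((kr.toNat : Int)) - 1 by omega,
        show kc + -1 = ((kc.toNat : Int)) - 1 by omega]
    rw [lineScan_backward _ kr.toNat _ (by omega) (by omega),
        lineScan_forward _ _ (kr + 1) (by omega) (by omega),
        lineScan_backward _ kc.toNat _ (by omega) (by omega),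
        lineScan_forward _ _ (kc + 1) (by omega) (by omega)]
    simp only [rayHit]
  · simp only [check_lines_straight, check_lines_straight_alt, List.any_cons, List.any_nil,
      Bool.or_false]
    rw [if_neg (by omega)]
    rw [scanDir_off _ _ _ _ _ _ _ (by omega), scanDir_off _ _ _ _ _ _ _ (by omega),
        scanDir_off _ _ _ _ _ _ _ (by omega), scanDir_off _ _ _ _ _ _ _ (by omega)]
    simp
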